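-- pv_equiv track=rewrite | github.com/ZEUSXAVI/PRIMER-PARCIAL-INF317-MENACHO-PACA-JAVIER | Ejercicio 4/Ejercicio 4.py | serie2
-- ===== SOURCE A (Python) =====
-- def serie2(n):
--     cont=1
--     l=[]
--     for i in range(1,n+1):
--         if i%2==0:
--             l.append(i)
--         else:
--             l.append(cont**2+1)
--             cont=cont+1
--     return l
-- ===== SOURCE B (Python) =====
-- def serie2(n):
--     # Staged construction: build the odd-slot values (squares plus one) and the
--     # even-slot values (the even numbers) as separate lists, then interleave them.
--     odds = [k * k + 1 for k in range(1, (n + 1) // 2 + 1)]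
--     evens = list(range(2, n + 1, 2))
--     out = []
--     for a, b in zip(odds, evens):
--         out.append(a)
--         out.append(b)
--     if len(odds) > len(evens):
--         out.append(odds[-1])
--     return out
-- ===== Notes on version B (the rewrite author's own statement) =====
-- stated objective: alternative
-- what changed: Replaces A's single pass that threads a running counter through the loop with a staged construction: first build the odd-slot values (k*k+1) and the even-slot values (the even numbers) as two separate lists, then interleave them with zip plus a possible trailing odd-slot element.
import Mathlib
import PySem

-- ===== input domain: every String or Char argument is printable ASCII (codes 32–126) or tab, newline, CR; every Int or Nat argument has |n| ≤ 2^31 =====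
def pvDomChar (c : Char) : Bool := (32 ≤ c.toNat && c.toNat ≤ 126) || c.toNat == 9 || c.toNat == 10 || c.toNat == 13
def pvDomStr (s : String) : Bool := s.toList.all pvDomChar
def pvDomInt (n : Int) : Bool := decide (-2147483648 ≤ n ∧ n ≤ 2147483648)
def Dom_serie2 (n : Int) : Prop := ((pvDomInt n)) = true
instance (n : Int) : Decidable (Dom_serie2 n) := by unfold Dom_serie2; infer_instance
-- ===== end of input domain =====

-- B builds the odd-slot and even-slot value lists separately and interleaves them,
-- instead of A's single counter-threading pass; objective: alternative.

-- ===== PORT A =====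
-- A threads the state (cont, l) through a loop over range(1, n+1).
def serie2 (n : Int) : List Int :=
  ((PySem.List.pyRange 1 (n + 1) 1).foldl
    (fun (s : Int × List Int) i =>
      if PySem.Int.mod i 2 == 0 then (s.1, s.2 ++ [i])
      else (s.1 + 1, s.2 ++ [s.1 ^ 2 + 1]))
    (1, [])).2

-- ===== PORT B =====
-- B: stage the odd-slot values and the even numbers, then interleave.
-- 'out.append(odds[-1])' is ported as appending (pyGet? odds (-1)).toList: in that
-- branch odds is nonempty, so pyGet? returns some (the last element), as in Python.
def serie2_alt (n : Int) : List Int :=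
  let odds := (PySem.List.pyRange 1 (PySem.Int.floordiv (n + 1) 2 + 1) 1).map
    (fun k => k * k + 1)
  let evens := PySem.List.pyRange 2 (n + 1) 2
  let out := (odds.zip evens).foldl (fun acc p => acc ++ [p.1, p.2]) []
  if evens.length < odds.length then out ++ (PySem.List.pyGet? odds (-1)).toList else out

-- ===== PRECONDITION & SPEC =====
def Spec_serie2 (n : Int) (out : List Int) : Prop := out = serie2_alt n
instance (n : Int) (out : List Int) : Decidable (Spec_serie2 n out) := by unfold Spec_serie2; infer_instance

-- ===== CLAIM (what is proved, stated in full; the proofs are below) =====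
def Claim_equal_serie2 : Prop := ∀ (n : Int), Dom_serie2 n → Spec_serie2 n (serie2 n)

-- ===== LEMMAS AND PROOFS =====

-- Canonical closed-form value, used as the bridge between the two ports.
def serie2Canon (n : Int) : List Int :=
  (PySem.List.pyRange 1 (n + 1) 1).map
    (fun i => if PySem.Int.mod i 2 == 0 then i
              else (PySem.Int.floordiv (i + 1) 2) ^ 2 + 1)

-- A-side invariant: after folding 1..m, cont = (m+1)//2 + 1 and the list is canonical.
theorem serie2_key (m : Nat) :
    ((PySem.List.pyRange 1 ((m : Int) + 1) 1).foldl
      (fun (s : Int × List Int) i =>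
        if PySem.Int.mod i 2 == 0 then (s.1, s.2 ++ [i])
        else (s.1 + 1, s.2 ++ [s.1 ^ 2 + 1]))
      (1, [])) =
    (PySem.Int.floordiv ((m : Int) + 1) 2 + 1, serie2Canon (m : Int)) := by
  induction m with
  | zero => decide
  | succ k ih =>
      have h1 : (1 : Int) ≤ (k : Int) + 1 := by omega
      have hsplit : PySem.List.pyRange 1 ((k : Int) + 1 + 1) 1
          = PySem.List.pyRange 1 ((k : Int) + 1) 1 ++ [(k : Int) + 1] :=
        PySem.List.pyRange_one_succ_right h1
      unfold serie2Canon at *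
      push_cast
      rw [hsplit, List.foldl_append, ih]
      simp only [List.foldl_cons, List.foldl_nil, List.map_append, List.map_cons, List.map_nil]
      by_cases hdvd : (2 : Int) ∣ ((k : Int) + 1)
      · have h : ((k : Int) + 1 + 1) / 2 = ((k : Int) + 1) / 2 := by omega
        simp [hdvd, h]
      · have h : ((k : Int) + 1 + 1) / 2 = ((k : Int) + 1) / 2 + 1 := by omega
        simp [hdvd, h]

-- zip truncates at the shorter list: appending past the end of the zip changes nothing.
theorem zip_snoc_left {α β : Type} (l1 : List α) (l2 : List β) (x : α)
    (h : l1.length = l2.length) : (l1 ++ [x]).zip l2 = l1.zip l2 := by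
  conv_lhs => rw [← List.append_nil l2]
  rw [List.zip_append h]
  simp

-- the last element of a snoc, fetched Python-style with index -1.
theorem pyGet_neg_one_snoc (l : List Int) (x : Int) :
    PySem.List.pyGet? (l ++ [x]) (-1) = some x := by
  have h : l.length + 1 - 1 = l.length := by omega
  simp [PySem.List.pyGet?, PySem.List.pyIdx?, h]

-- B's two staged lists, rewritten as maps over Nat ranges.
def serie2AltN (m : Nat) : List Int :=
  let odds := (List.range ((m + 1) / 2)).map (fun (k : Nat) => (1 + (k : Int)) * (1 + (k : Int)) + 1)
  let evens := (List.range (m / 2)).map (fun (k : Nat) => 2 + 2 * (k : Int))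
  let out := (odds.zip evens).foldl (fun acc p => acc ++ [p.1, p.2]) []
  if evens.length < odds.length then out ++ (PySem.List.pyGet? odds (-1)).toList else out

theorem foldl_pairs_snoc (zs : List (Int × Int)) (x y : Int) :
    (zs ++ [(x, y)]).foldl (fun acc p => acc ++ [p.1, p.2]) []
      = zs.foldl (fun acc p => acc ++ [p.1, p.2]) [] ++ [x, y] := by
  rw [List.foldl_append]
  simp

theorem altN_step_odd (t : Nat) :
    serie2AltN (t + t + 1) = serie2AltN (t + t) ++ [(1 + (t : Int)) * (1 + (t : Int)) + 1] := by
  have h1 : (t + t + 1 + 1) / 2 = t + 1 := by omega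
  have h2 : (t + t + 1) / 2 = t := by omega
  have h3 : (t + t) / 2 = t := by omega
  simp only [serie2AltN, h1, h2, h3, List.range_succ, List.map_append, List.map_cons,
    List.map_nil]
  rw [zip_snoc_left _ _ _ (by simp), pyGet_neg_one_snoc]
  simp

theorem altN_step_even (t : Nat) :
    serie2AltN (t + t + 1 + 1) = serie2AltN (t + t + 1) ++ [2 + 2 * (t : Int)] := by
  have h1 : (t + t + 1 + 1 + 1) / 2 = t + 1 := by omega
  have h2 : (t + t + 1 + 1) / 2 = t + 1 := by omega
  have h3 : (t + t + 1) / 2 = t := by omega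
  simp only [serie2AltN, h1, h2, h3, List.range_succ, List.map_append, List.map_cons,
    List.map_nil]
  rw [List.zip_append (by simp)]
  simp only [List.zip_cons_cons, List.zip_nil_right]
  rw [zip_snoc_left _ _ _ (by simp), foldl_pairs_snoc, pyGet_neg_one_snoc]
  simp

theorem serie2AltN_key (m : Nat) :
    serie2AltN m = (List.range m).map
      (fun (j : Nat) => if PySem.Int.mod (1 + (j : Int)) 2 == 0 then 1 + (j : Int)
                else (PySem.Int.floordiv (1 + (j : Int) + 1) 2) ^ 2 + 1) := by
  induction m with
  | zero => decide
  | succ k ih =>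
      rw [List.range_succ, List.map_append, ← ih, List.map_cons, List.map_nil]
      rcases Nat.even_or_odd k with ⟨t, ht⟩ | ⟨t, ht⟩
      · subst ht
        rw [altN_step_odd t]
        congr 1
        congr 1
        have hm : ¬ ((PySem.Int.mod (1 + ((t + t : Nat) : Int)) 2 == 0) = true) := by
          simp only [PySem.Int.mod, Int.fmod_eq_emod, beq_iff_eq]
          omega
        rw [if_neg hm]
        have hd : PySem.Int.floordiv (1 + ((t + t : Nat) : Int) + 1) 2 = 1 + (t : Int) := by
          simp only [PySem.Int.floordiv, Int.fdiv_eq_ediv]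
          norm_num
          omega
        rw [hd]
        ring
      · obtain rfl : k = t + t + 1 := by omega
        rw [altN_step_even t]
        congr 1
        congr 1
        have hm : (PySem.Int.mod (1 + ((t + t + 1 : Nat) : Int)) 2 == 0) = true := by
          simp only [PySem.Int.mod, Int.fmod_eq_emod, beq_iff_eq]
          omega
        rw [if_pos hm]
        push_cast
        ring

theorem serie2_alt_key (m : Nat) : serie2_alt (m : Int) = serie2Canon (m : Int) := by
  have hodds : ((((m : Int) + 1).fdiv 2 + 1) - 1).toNat = (m + 1) / 2 := by
    simp only [Int.fdiv_eq_ediv]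
    norm_num
    omega
  have hcnt : (if (2 : Int) < (m : Int) + 1
      then (((m : Int) + 1 - 2 + 2 - 1) / 2).toNat else 0) = m / 2 := by
    split_ifs with h <;> omega
  suffices h : serie2AltN m = serie2Canon ((m : Int)) by
    unfold serie2_alt
    rw [PySem.List.pyRange_one, PySem.List.pyRange_of_pos 2 ((m : Int) + 1)
      (by norm_num : (0 : Int) < 2)]
    simp only [PySem.Int.floordiv] at hodds ⊢
    rw [hodds, hcnt]
    simp only [List.map_map]
    exact h
  rw [serie2AltN_key m]
  unfold serie2Canon
  rw [PySem.List.pyRange_one]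
  have hm' : ((m : Int) + 1 - 1).toNat = m := by omega
  rw [hm']
  simp only [List.map_map]
  rfl

-- ===== VERDICT (by name: the statement is the Claim_ definition above) =====
theorem serie2_spec : Claim_equal_serie2 := by
  intro n _
  unfold Spec_serie2 serie2
  by_cases hn : n ≤ 0
  · have h1 : n + 1 ≤ 1 := by omega
    have h2 : ¬ ((2:Int) < n + 1) := by omega
    have h3 : PySem.Int.floordiv (n + 1) 2 + 1 ≤ 1 := by
      simp only [PySem.Int.floordiv, Int.fdiv_eq_ediv]
      omega
    unfold serie2_alt
    rw [PySem.List.pyRange_one_eq_nil h1, PySem.List.pyRange_one_eq_nil h3]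
    simp [PySem.List.pyRange, h2]
  · have hn' : n = ((n.toNat : Int)) := by omega
    rw [hn', serie2_key n.toNat, serie2_alt_key n.toNat]
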